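-- pv_equiv track=rewrite | github.com/gomadare111/ReportGenerator | statistic.py | score_sort
-- ===== SOURCE A (Python) =====
-- def score_sort( part_title:list , names:list , personal_score:dict ):
--
--     sorted_score = {"total":[]}
--     for part in part_title:
--         sorted_score[ part ] = []
--
--     for name in names:
--         sorted_score["total"].append( sum( list( personal_score[name].values() ) ) )
--
--         for part in part_title:
--             sorted_score[part].append( personal_score[name][part] )
--
--     sorted_score["total"].sort( reverse=True )
--
--     for part in part_title:
--         sorted_score[ part ].sort( reverse=True )
--
--     return sorted_score
-- ===== SOURCE B (Python) =====
-- def score_sort(part_title: list, names: list, personal_score: dict):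
--     # online insertion sort: every output list is kept sorted descending at all
--     # times while values arrive, so there is no collect-then-sort pass at all
--     sorted_score = {"total": []}
--     for name in names:
--         _insort_desc(sorted_score["total"], sum(personal_score[name].values()))
--     for part in part_title:
--         col = sorted_score.setdefault(part, [])
--         for name in names:
--             _insort_desc(col, personal_score[name][part])
--     return sorted_score
--
--
-- def _insort_desc(col, v):
--     # insert v before the first element strictly smaller than it
--     i = 0
--     while i < len(col) and col[i] >= v:
--         i += 1
--     col.insert(i, v)
-- ===== Notes on version B (the rewrite author's own statement) =====
-- stated objective: alternative
-- what changed: B replaces A's collect-everything-then-sort-each-list design with an online insertion sort: every output list is maintained in descending order at all times via a hand-written linear insort, so the final sorting passes disappear entirely (trading Timsort's O(n log n) per column for insertion sort's O(n^2)).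
import Mathlib
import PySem

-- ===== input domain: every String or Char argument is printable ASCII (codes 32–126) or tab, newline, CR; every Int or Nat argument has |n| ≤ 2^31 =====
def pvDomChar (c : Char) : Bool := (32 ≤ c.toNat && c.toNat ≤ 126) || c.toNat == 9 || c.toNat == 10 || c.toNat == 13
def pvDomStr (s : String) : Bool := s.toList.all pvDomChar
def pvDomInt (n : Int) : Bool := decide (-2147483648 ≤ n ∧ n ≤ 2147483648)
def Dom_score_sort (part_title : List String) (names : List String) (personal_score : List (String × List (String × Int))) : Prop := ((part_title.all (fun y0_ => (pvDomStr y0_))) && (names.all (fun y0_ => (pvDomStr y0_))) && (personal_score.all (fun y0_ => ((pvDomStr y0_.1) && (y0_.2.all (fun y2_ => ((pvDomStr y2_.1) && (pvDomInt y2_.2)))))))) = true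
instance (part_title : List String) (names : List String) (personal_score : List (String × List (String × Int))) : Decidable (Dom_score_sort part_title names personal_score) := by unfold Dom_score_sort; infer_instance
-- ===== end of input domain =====

-- B maintains every output list sorted descending online (hand-written insort at each
-- arrival) instead of A's append-everything-then-sort-each-list passes; same values on Pre_.


-- the Python `dict` parameter personal_score, as a PySem.Dict of PySem.Dicts (used by both ports)
def psDict (personal_score : List (String × List (String × Int))) : PySem.Dict String (PySem.Dict String Int) :=
  PySem.Dict.ofList (personal_score.map (fun p => (p.1, PySem.Dict.ofList p.2)))

-- ===== PORT A =====
def score_sort (part_title : List String) (names : List String) (personal_score : List (String × List (String × Int))) : List (String × List Int) :=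
  let ps := psDict personal_score
  -- sorted_score = {"total": []}; for part in part_title: sorted_score[part] = []
  let d0 := (PySem.Dict.empty.insert "total" ([] : List Int))
  let d1 := part_title.foldl (fun d part => d.insert part []) d0
  -- for name in names: append total and each part score (KeyError excluded by Pre_)
  let d2 := names.foldl (fun d name =>
      let row := ps.getD name PySem.Dict.empty
      let d := d.modify "total" [] (fun l => l ++ [row.values.sum])
      part_title.foldl (fun d part => d.modify part [] (fun l => l ++ [row.getD part 0])) d) d1
  -- sorted_score["total"].sort(reverse=True); for part: sorted_score[part].sort(reverse=True)
  let d3 := d2.modify "total" [] (fun l => PySem.List.sorted l (fun x => x) true)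
  let d4 := part_title.foldl (fun d part => d.modify part [] (fun l => PySem.List.sorted l (fun x => x) true)) d3
  d4.items

-- ===== PORT B =====
-- _insort_desc: linear scan for the first element strictly smaller than v, insert v there
-- (exact: the structural recursion computes the same insertion as the Python index loop)
def insortDesc (col : List Int) (v : Int) : List Int :=
  match col with
  | [] => [v]
  | x :: xs => if x ≥ v then x :: insortDesc xs v else v :: x :: xs

def score_sort_alt (part_title : List String) (names : List String) (personal_score : List (String × List (String × Int))) : List (String × List Int) :=
  let ps := psDict personal_score
  -- sorted_score = {"total": []}; for name in names: _insort_desc(sorted_score["total"], sum(...))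
  let d0 := (PySem.Dict.empty.insert "total" ([] : List Int))
  let d1 := names.foldl (fun d name =>
      d.modify "total" [] (fun l => insortDesc l (ps.getD name PySem.Dict.empty).values.sum)) d0
  -- for part: col = sorted_score.setdefault(part, []); for name: _insort_desc(col, ...)
  let d2 := part_title.foldl (fun d part =>
      names.foldl (fun d name =>
          d.modify part [] (fun l => insortDesc l ((ps.getD name PySem.Dict.empty).getD part 0)))
        (d.setdefault part [])) d1
  d2.items

-- ===== PRECONDITION & SPEC =====
-- Pre_ excludes exactly the inputs on which A raises KeyError: a name of `names` missing from
-- personal_score, or a part of part_title missing from some listed name's score row.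
def Pre_score_sort (part_title : List String) (names : List String) (personal_score : List (String × List (String × Int))) : Prop :=
  ∀ n ∈ names, (psDict personal_score).contains n = true ∧
    ∀ p ∈ part_title, ((psDict personal_score).getD n PySem.Dict.empty).contains p = true
instance (part_title : List String) (names : List String) (personal_score : List (String × List (String × Int))) : Decidable (Pre_score_sort part_title names personal_score) := by unfold Pre_score_sort; infer_instance
def pvWitness_score_sort : List String × List String × (List (String × List (String × Int))) :=
  (["p1", "p2"], ["ann", "bob"], [("ann", [("p1", 3), ("p2", 1)]), ("bob", [("p1", 2), ("p2", 5)])])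

def Spec_score_sort (part_title : List String) (names : List String) (personal_score : List (String × List (String × Int))) (out : List (String × List Int)) : Prop := out = score_sort_alt part_title names personal_score
instance (part_title : List String) (names : List String) (personal_score : List (String × List (String × Int))) (out : List (String × List Int)) : Decidable (Spec_score_sort part_title names personal_score out) := by unfold Spec_score_sort; infer_instance

-- ===== CLAIM (what is proved, stated in full; the proofs are below) =====
def Claim_equal_score_sort : Prop := ∀ (part_title : List String) (names : List String) (personal_score : List (String × List (String × Int))), Dom_score_sort part_title names personal_score → Pre_score_sort part_title names personal_score → Spec_score_sort part_title names personal_score (score_sort part_title names personal_score)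

-- ===== LEMMAS AND PROOFS =====

-- descending sort of Ints is determined by the multiset of elements
lemma sorted_rev_eq_of_perm {xs ys : List Int} (h : xs.Perm ys) :
    PySem.List.sorted xs (fun x => x) true = PySem.List.sorted ys (fun x => x) true := by
  refine PySem.List.eq_of_perm_of_pairwise_le_of_injective (fun x => -x) neg_injective
    (((PySem.List.sorted_perm xs _ _).trans h).trans (PySem.List.sorted_perm ys _ _).symm) ?_ ?_ <;>
    exact (PySem.List.sorted_pairwise_rev _ _).imp (fun hab => by exact neg_le_neg hab)

-- a descending pairwise list IS the descending sort of any permutation of it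
lemma eq_sorted_of_pairwise_perm {l m : List Int}
    (hp : l.Pairwise (fun a b => b ≤ a)) (hperm : l.Perm m) :
    l = PySem.List.sorted m (fun x => x) true := by
  refine PySem.List.eq_of_perm_of_pairwise_le_of_injective (fun x => -x) neg_injective
    (hperm.trans (PySem.List.sorted_perm m _ _).symm) ?_ ?_
  · exact hp.imp (fun hab => by exact neg_le_neg hab)
  · exact (PySem.List.sorted_pairwise_rev _ _).imp (fun hab => by exact neg_le_neg hab)

lemma insortDesc_perm (l : List Int) (v : Int) : (insortDesc l v).Perm (v :: l) := by
  induction l with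
  | nil => simp [insortDesc]
  | cons x xs ih =>
    simp only [insortDesc]
    split
    · exact (List.Perm.cons x ih).trans (List.Perm.swap v x xs)
    · exact List.Perm.refl _

lemma insortDesc_pairwise {l : List Int} (v : Int)
    (h : l.Pairwise (fun a b => b ≤ a)) : (insortDesc l v).Pairwise (fun a b => b ≤ a) := by
  induction l with
  | nil => simp [insortDesc]
  | cons x xs ih =>
    rcases List.pairwise_cons.mp h with ⟨hx, hxs⟩
    simp only [insortDesc]
    split
    · rename_i hvx
      refine List.pairwise_cons.mpr ⟨?_, ih hxs⟩
      intro y hy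
      rcases List.mem_cons.mp ((insortDesc_perm xs v).mem_iff.mp hy) with h | h
      · exact (le_of_eq h).trans hvx
      · exact hx y h
    · rename_i hvx
      have hvx' : x < v := lt_of_not_ge hvx
      refine List.pairwise_cons.mpr ⟨?_, h⟩
      intro y hy
      rcases List.mem_cons.mp hy with rfl | hy'
      · exact le_of_lt hvx'
      · exact le_trans (hx y hy') (le_of_lt hvx')

lemma foldl_insortDesc_perm (xs l : List Int) : (xs.foldl insortDesc l).Perm (l ++ xs) := by
  induction xs generalizing l with
  | nil => simp
  | cons x xs ih =>
    rw [List.foldl_cons]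
    refine (ih _).trans ?_
    refine (List.Perm.append_right xs (insortDesc_perm l x)).trans ?_
    exact List.Perm.of_eq (by simp) |>.trans (List.perm_middle.symm)

lemma foldl_insortDesc_pairwise (xs : List Int) {l : List Int}
    (h : l.Pairwise (fun a b => b ≤ a)) : (xs.foldl insortDesc l).Pairwise (fun a b => b ≤ a) := by
  induction xs generalizing l with
  | nil => exact h
  | cons x xs ih => exact ih (insortDesc_pairwise x h)

-- repeatedly insorting into a descending list is the descending sort of everything
lemma foldl_insortDesc_eq_sorted (xs l : List Int) (h : l.Pairwise (fun a b => b ≤ a)) :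
    xs.foldl insortDesc l = PySem.List.sorted (l ++ xs) (fun x => x) true :=
  eq_sorted_of_pairwise_perm (foldl_insortDesc_pairwise xs h) (foldl_insortDesc_perm xs l)

-- getD through a fold that modifies one FIXED key
lemma getD_foldl_modify_fixed {β : Type} (t : String) (g : β → List Int → List Int)
    (xs : List β) (d : PySem.Dict String (List Int)) (k : String) :
    (xs.foldl (fun d x => d.modify t [] (fun l => g x l)) d).getD k []
      = if k = t then xs.foldl (fun l x => g x l) (d.getD t []) else d.getD k [] := by
  induction xs generalizing d with
  | nil =>
    by_cases hk : k = t
    · subst hk; simp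
    · simp [hk]
  | cons x xs ih =>
    rw [List.foldl_cons, ih]
    by_cases hk : k = t
    · subst hk; rw [if_pos rfl, if_pos rfl, PySem.Dict.getD_modify_self, List.foldl_cons]
    · rw [if_neg hk, if_neg hk, PySem.Dict.getD_modify]
      simp [hk]

-- getD through a fold that appends a block g p at each occurrence of p
lemma getD_foldl_modify_appendlist (g : String → List Int) (parts : List String)
    (d : PySem.Dict String (List Int)) (k : String) :
    (parts.foldl (fun d p => d.modify p [] (fun l => l ++ g p)) d).getD k []
      = d.getD k [] ++ (List.replicate (parts.count k) (g k)).flatten := by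
  induction parts generalizing d with
  | nil => simp
  | cons p ps ih =>
    rw [List.foldl_cons, ih, PySem.Dict.getD_modify]
    by_cases hkp : k = p
    · subst hkp
      simp [List.count_cons_self, List.replicate_succ, List.append_assoc]
    · have : p ≠ k := fun h => hkp h.symm
      simp [hkp, List.count_cons_of_ne this]

-- getD through the final sorting pass (sorting twice is sorting once)
lemma getD_foldl_sort (parts : List String) (d : PySem.Dict String (List Int)) (k : String) :
    (parts.foldl (fun d p => d.modify p [] (fun l => PySem.List.sorted l (fun x => x) true)) d).getD k []
      = if k ∈ parts then PySem.List.sorted (d.getD k []) (fun x => x) true else d.getD k [] := by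
  induction parts generalizing d with
  | nil => simp
  | cons p ps ih =>
    rw [List.foldl_cons, ih, PySem.Dict.getD_modify]
    by_cases hk : k ∈ ps
    · by_cases hkp : k = p
      · subst hkp
        simp [hk, PySem.List.sorted_rev_sorted_rev]
      · simp [hk, hkp]
    · by_cases hkp : k = p <;> simp [hk, hkp]

lemma set_update_subset (s : PySem.Set String) (xs : List String) (h : ∀ x ∈ xs, x ∈ s) :
    PySem.Set.update s xs = s := by
  rw [PySem.Set.update_eq_append_filter]
  simpa using h

-- keys are unchanged by the names loop of A when "total" and all parts are already keys
lemma namesLoop_keys (P : PySem.Dict String (PySem.Dict String Int)) (parts names : List String)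
    (d : PySem.Dict String (List Int)) (h1 : "total" ∈ d.keys) (h2 : ∀ p ∈ parts, p ∈ d.keys) :
    (names.foldl (fun d name =>
        List.foldl (fun d part => d.modify part [] (fun l => l ++ [(P.getD name PySem.Dict.empty).getD part 0]))
          (d.modify "total" [] (fun l => l ++ [(P.getD name PySem.Dict.empty).values.sum])) parts) d).keys
      = d.keys := by
  induction names generalizing d with
  | nil => rfl
  | cons n ns ih =>
    have hstep :
        (List.foldl (fun d part => d.modify part [] (fun l => l ++ [(P.getD n PySem.Dict.empty).getD part 0]))
          (d.modify "total" [] (fun l => l ++ [(P.getD n PySem.Dict.empty).values.sum])) parts).keys = d.keys := by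
      rw [PySem.Dict.keys_foldl_modify, PySem.Dict.keys_modify,
          PySem.Dict.keys_insert_of_contains _ _ ((PySem.Dict.contains_iff_mem_keys _ _).mpr h1),
          set_update_subset _ _ h2]
    rw [List.foldl_cons, ih _ (hstep ▸ h1) (fun p hp => hstep ▸ h2 p hp), hstep]

-- the value lists accumulated by A's names loop, key by key (duplicates in parts included)
lemma namesLoop_getD (P : PySem.Dict String (PySem.Dict String Int)) (parts names : List String)
    (d : PySem.Dict String (List Int)) (k : String) :
    (names.foldl (fun d name =>
        List.foldl (fun d part => d.modify part [] (fun l => l ++ [(P.getD name PySem.Dict.empty).getD part 0]))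
          (d.modify "total" [] (fun l => l ++ [(P.getD name PySem.Dict.empty).values.sum])) parts) d).getD k []
      = d.getD k [] ++
          names.flatMap (fun n =>
            (if k = "total" then [(P.getD n PySem.Dict.empty).values.sum] else []) ++
            (List.replicate (parts.count k) [(P.getD n PySem.Dict.empty).getD k 0]).flatten) := by
  induction names generalizing d with
  | nil => simp
  | cons n ns ih =>
    rw [List.foldl_cons, ih, getD_foldl_modify_appendlist, PySem.Dict.getD_modify]
    by_cases hk : k = "total"
    · subst hk
      simp [List.append_assoc]
    · simp [hk, List.append_assoc]

-- values inserted by the init loop are all []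
lemma getD_foldl_insert_nil (parts : List String) (d : PySem.Dict String (List Int))
    (h : ∀ k, d.getD k [] = []) (k : String) :
    (parts.foldl (fun d p => d.insert p ([] : List Int)) d).getD k [] = [] := by
  induction parts generalizing d with
  | nil => exact h k
  | cons p ps ih =>
    rw [List.foldl_cons]
    refine ih _ (fun k' => ?_)
    rw [PySem.Dict.getD_insert]
    split <;> simp [h]

-- a flatMap of appended blocks is a permutation of the two flatMaps
lemma flatMap_append_perm {α β : Type} (a b : α → List β) (l : List α) :
    (l.flatMap (fun x => a x ++ b x)).Perm (l.flatMap a ++ l.flatMap b) := by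
  induction l with
  | nil => simp
  | cons x xs ih =>
    simp only [List.flatMap_cons, List.append_assoc]
    refine List.Perm.append_left _ ?_
    refine (List.Perm.append_left _ ih).trans ?_
    exact List.perm_append_comm_assoc _ _ _

-- per-name replication of a value is, as a multiset, replication of the whole column
lemma flatMap_replicate_perm (names : List String) (f : String → Int) (c : Nat) :
    (names.flatMap (fun n => (List.replicate c [f n]).flatten)).Perm
      (List.replicate c (names.map f)).flatten := by
  induction c with
  | zero => simp
  | succ m ih =>
    simp only [List.replicate_succ, List.flatten_cons]
    refine (flatMap_append_perm (fun n => [f n]) (fun n => (List.replicate m [f n]).flatten) names).trans ?_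
    rw [← List.map_eq_flatMap]
    exact List.Perm.append_left _ ih

-- keys through B's parts loop (setdefault then fixed-key insorts)
lemma partsLoopB_keys (g : String → String → List Int → List Int) (parts names : List String)
    (d : PySem.Dict String (List Int)) :
    (parts.foldl (fun d part =>
        names.foldl (fun d name => d.modify part [] (fun l => g name part l)) (d.setdefault part [])) d).keys
      = PySem.Set.update d.keys parts := by
  induction parts generalizing d with
  | nil => simp [PySem.Set.update]
  | cons p ps ih =>
    rw [List.foldl_cons, ih]
    have hkstep : (names.foldl (fun d name => d.modify p [] (fun l => g name p l)) (d.setdefault p [])).keys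
        = (d.setdefault p []).keys := by
      have hp : p ∈ (d.setdefault p []).keys := by
        by_cases hc : d.contains p = true
        · rw [PySem.Dict.setdefault_of_contains _ _ hc]
          exact (PySem.Dict.contains_iff_mem_keys _ _).mp hc
        · rw [PySem.Dict.setdefault_of_not_contains _ _ (Bool.eq_false_iff.mpr hc),
              PySem.Dict.keys_insert_of_not_contains _ _ (Bool.eq_false_iff.mpr hc)]
          simp
      rw [PySem.Dict.keys_foldl_modify_key]
      exact set_update_subset _ _ (by intro x hx; simp at hx; rcases hx with ⟨_, _, rfl⟩; exact hp)
    rw [hkstep]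
    have hsd : (d.setdefault p []).keys = PySem.Set.add d.keys p := by
      by_cases hc : d.contains p = true
      · rw [PySem.Dict.setdefault_of_contains _ _ hc, PySem.Set.add]
        simp [(PySem.Dict.contains_iff_mem_keys _ _).mp hc]
      · rw [PySem.Dict.setdefault_of_not_contains _ _ (Bool.eq_false_iff.mpr hc),
            PySem.Dict.keys_insert_of_not_contains _ _ (Bool.eq_false_iff.mpr hc), PySem.Set.add]
        have : ¬ p ∈ d.keys := fun h => hc ((PySem.Dict.contains_iff_mem_keys _ _).mpr h)
        simp [this]
    rw [hsd, ← PySem.Set.update_cons]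

-- values through B's parts loop: each occurrence of k insorts the whole column of names
lemma partsLoopB_getD (v : String → String → Int) (parts names : List String)
    (d : PySem.Dict String (List Int)) (k : String) :
    (parts.foldl (fun d part =>
        names.foldl (fun d name => d.modify part [] (fun l => insortDesc l (v name part)))
          (d.setdefault part [])) d).getD k []
      = ((List.replicate (parts.count k) (names.map (fun n => v n k))).flatten).foldl insortDesc (d.getD k []) := by
  induction parts generalizing d with
  | nil => simp
  | cons p ps ih =>
    rw [List.foldl_cons, ih, getD_foldl_modify_fixed]
    have hsd : ∀ k', (d.setdefault p []).getD k' [] = d.getD k' [] := by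
      intro k'
      by_cases hc : d.contains p = true
      · rw [PySem.Dict.setdefault_of_contains _ _ hc]
      · rw [PySem.Dict.setdefault_of_not_contains _ _ (Bool.eq_false_iff.mpr hc), PySem.Dict.getD_insert]
        split
        · rename_i h; subst h
          exact (PySem.Dict.getD_of_not_contains _ _ (Bool.eq_false_iff.mpr hc)).symm
        · rfl
    by_cases hk : k = p
    · subst hk
      rw [if_pos rfl, hsd, List.count_cons_self, List.replicate_succ, List.flatten_cons,
          List.foldl_append, List.foldl_map]
    · rw [if_neg hk, hsd, List.count_cons_of_ne (fun h => hk h.symm)]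

-- ===== VERDICT (by name: the statement is the Claim_ definition above) =====
theorem score_sort_spec : Claim_equal_score_sort := by
  intro parts names ps hdom hpre
  unfold Spec_score_sort
  simp only [score_sort, score_sort_alt]
  set P := psDict ps with hP
  set d1 := List.foldl (fun d part => d.insert part ([] : List Int))
      (PySem.Dict.empty.insert "total" ([] : List Int)) parts with hd1
  set d2 := List.foldl (fun (d : PySem.Dict String (List Int)) name =>
      List.foldl (fun d part => d.modify part [] (fun l => l ++ [(P.getD name PySem.Dict.empty).getD part 0]))
        (d.modify "total" [] (fun l => l ++ [(P.getD name PySem.Dict.empty).values.sum])) parts) d1 names with hd2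
  set d3 := d2.modify "total" [] (fun l => PySem.List.sorted l (fun x => x) true) with hd3
  set d4 := List.foldl (fun (d : PySem.Dict String (List Int)) part =>
      d.modify part [] (fun l => PySem.List.sorted l (fun x => x) true)) d3 parts with hd4
  set b1 := List.foldl (fun (d : PySem.Dict String (List Int)) name =>
      d.modify "total" [] (fun l => insortDesc l (P.getD name PySem.Dict.empty).values.sum))
      (PySem.Dict.empty.insert "total" ([] : List Int)) names with hb1
  set b2 := List.foldl (fun (d : PySem.Dict String (List Int)) part =>
      List.foldl (fun d name => d.modify part [] (fun l => insortDesc l ((P.getD name PySem.Dict.empty).getD part 0)))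
        (d.setdefault part []) names) b1 parts with hb2
  -- the common key list
  set K := PySem.Set.update ["total"] parts with hK
  have hmemK : ∀ k ∈ K, k = "total" ∨ k ∈ parts := by
    intro k hk
    rcases (PySem.Set.mem_update _ _ _).mp hk with h | h
    · left; simpa using h
    · right; exact h
  have htotK : "total" ∈ K := (PySem.Set.mem_update _ _ _).mpr (Or.inl (by simp))
  have hpartsK : ∀ p ∈ parts, p ∈ K := fun p hp => (PySem.Set.mem_update _ _ _).mpr (Or.inr hp)
  have hnodupK : K.Nodup := PySem.Set.nodup_update _ _ (by simp)
  -- A side: keys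
  have hkeys1 : d1.keys = K := by
    rw [hd1, PySem.Dict.keys_foldl_insert]; rfl
  have hkeys2 : d2.keys = K := by
    rw [hd2, namesLoop_keys P parts names d1 (hkeys1 ▸ htotK) (fun p hp => hkeys1 ▸ hpartsK p hp), hkeys1]
  have htot2 : "total" ∈ d2.keys := hkeys2 ▸ htotK
  have hkeys3 : d3.keys = K := by
    rw [hd3, PySem.Dict.keys_modify,
        PySem.Dict.keys_insert_of_contains _ _ ((PySem.Dict.contains_iff_mem_keys _ _).mpr htot2), hkeys2]
  have hkeys4 : d4.keys = K := by
    rw [hd4, PySem.Dict.keys_foldl_modify, hkeys3, set_update_subset _ _ hpartsK]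
  -- A side: values
  have hgetD1 : ∀ k, d1.getD k [] = [] := by
    intro k
    rw [hd1]
    refine getD_foldl_insert_nil parts _ (fun k' => ?_) k
    rw [PySem.Dict.getD_insert]
    split <;> simp [PySem.Dict.getD_empty]
  have hgetD2 : ∀ k, d2.getD k []
      = names.flatMap (fun n =>
          (if k = "total" then [(P.getD n PySem.Dict.empty).values.sum] else []) ++
          (List.replicate (parts.count k) [(P.getD n PySem.Dict.empty).getD k 0]).flatten) := by
    intro k
    rw [hd2, namesLoop_getD, hgetD1]
    simp
  have hgetD4 : ∀ k ∈ K, d4.getD k [] = PySem.List.sorted (d2.getD k []) (fun x => x) true := by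
    intro k hk
    rw [hd4, getD_foldl_sort, hd3, PySem.Dict.getD_modify]
    rcases hmemK k hk with hk' | hk'
    · subst hk'
      by_cases hp : "total" ∈ parts
      · simp [hp, PySem.List.sorted_rev_sorted_rev]
      · simp [hp]
    · by_cases hkt : k = "total"
      · subst hkt
        simp [hk', PySem.List.sorted_rev_sorted_rev]
      · simp [hk', hkt]
  -- B side: keys
  have hkeys0 : (PySem.Dict.empty.insert "total" ([] : List Int)).keys = ["total"] := by
    rw [PySem.Dict.keys_insert_of_not_contains _ _ (PySem.Dict.contains_empty _)]
    rfl
  have hkeysb1 : b1.keys = ["total"] := by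
    rw [hb1, PySem.Dict.keys_foldl_modify_key, set_update_subset, hkeys0]
    intro x hx
    simp at hx
    rcases hx with ⟨_, _, rfl⟩
    rw [hkeys0]
    simp
  have hkeysb2 : b2.keys = K := by
    rw [hb2, partsLoopB_keys, hkeysb1]
  -- B side: values
  have hgetDb1 : ∀ k, b1.getD k []
      = if k = "total" then (names.map (fun n => (P.getD n PySem.Dict.empty).values.sum)).foldl insortDesc [] else [] := by
    intro k
    rw [hb1, getD_foldl_modify_fixed]
    by_cases hk : k = "total"
    · subst hk
      rw [if_pos rfl, if_pos rfl, List.foldl_map]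
      congr 1
    · rw [if_neg hk, if_neg hk, PySem.Dict.getD_insert]
      simp [hk, PySem.Dict.getD_empty]
  have hgetDb2 : ∀ k, b2.getD k []
      = PySem.List.sorted
          ((if k = "total" then names.map (fun n => (P.getD n PySem.Dict.empty).values.sum) else []) ++
           (List.replicate (parts.count k) (names.map (fun n => (P.getD n PySem.Dict.empty).getD k 0))).flatten)
          (fun x => x) true := by
    intro k
    rw [hb2, partsLoopB_getD, hgetDb1]
    by_cases hk : k = "total"
    · rw [if_pos hk, if_pos hk, ← List.foldl_append, foldl_insortDesc_eq_sorted _ _ (by simp)]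
      simp
    · rw [if_neg hk, if_neg hk, foldl_insortDesc_eq_sorted _ _ (by simp)]
  -- items of both sides as maps over K
  have hitemsA : d4.items = K.map (fun k => (k, d4.getD k [])) := by
    rw [PySem.Dict.items_eq_map_keys d4 (hkeys4 ▸ hnodupK) [], hkeys4]
  have hitemsB : b2.items = K.map (fun k => (k, b2.getD k [])) := by
    rw [PySem.Dict.items_eq_map_keys b2 (hkeysb2 ▸ hnodupK) [], hkeysb2]
  rw [hitemsA, hitemsB]
  refine List.map_congr_left ?_
  intro k hk
  refine Prod.ext rfl ?_
  rw [hgetD4 k hk, hgetDb2, hgetD2]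
  refine sorted_rev_eq_of_perm
    ((flatMap_append_perm _ _ _).trans (List.Perm.append ?_ (flatMap_replicate_perm _ _ _)))
  refine List.Perm.of_eq ?_
  split
  · exact Eq.symm List.map_eq_flatMap
  · simp
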